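-- pv_equiv track=rewrite | github.com/miliar/Code_Jam_Webscraper | Solutions_python/Problem_10/66.py | solve
-- ===== SOURCE A (Python) =====
-- def solve(P, K, L, frequencies) :
--     keys = [[] for i in range(K)]
--     frequencies = list(reversed(sorted(frequencies)))
--     k = 0
--     for f in frequencies :
--         keys[k] += [f]
--         if len(keys[k]) > P+1 :
--             return False
--         k = (k + 1) % K
--     s = 0
--     for key in keys :
--         for i in range(len(key)) :
--             s += key[i]*(i+1)
--     return s
-- ===== SOURCE B (Python) =====
-- def solve(P, K, L, frequencies):
--     # Index arithmetic instead of building K bucket lists: the j-th largest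
--     # frequency lands at within-key position j//K, i.e. weight j//K + 1.
--     fs = sorted(frequencies, reverse=True)
--     if fs and len(fs) > (P + 1) * K:
--         return False
--     return sum(f * (i // K + 1) for i, f in enumerate(fs))
-- ===== Notes on version B (the rewrite author's own statement) =====
-- stated objective: simpler
-- what changed: Instead of materialising K bucket lists round-robin and summing them in a second nested pass, B sorts descending once and computes the answer directly by index arithmetic (element j gets weight j//K+1; overflow iff len > (P+1)*K).
-- outside the precondition, e.g. on solve(1, 1, 4, [4, -1, 6]): A returns False, B returns False
import Mathlib
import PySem

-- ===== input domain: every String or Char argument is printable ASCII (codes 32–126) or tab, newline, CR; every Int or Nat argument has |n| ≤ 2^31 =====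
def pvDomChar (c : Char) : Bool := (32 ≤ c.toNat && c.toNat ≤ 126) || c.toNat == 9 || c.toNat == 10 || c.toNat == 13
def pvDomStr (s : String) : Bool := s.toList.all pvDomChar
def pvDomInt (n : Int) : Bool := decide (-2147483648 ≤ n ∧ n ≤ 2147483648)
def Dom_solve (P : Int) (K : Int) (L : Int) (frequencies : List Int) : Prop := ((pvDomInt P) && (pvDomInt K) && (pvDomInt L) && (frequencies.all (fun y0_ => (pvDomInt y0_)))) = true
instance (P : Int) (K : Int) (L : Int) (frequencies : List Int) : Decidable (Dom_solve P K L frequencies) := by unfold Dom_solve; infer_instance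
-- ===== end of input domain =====

-- B replaces A's round-robin bucket lists and second nested summation pass by
-- direct index arithmetic over the descending sort (objective: simpler).

-- ===== PORT A =====
-- 's = 0; for key in keys: for i in range(len(key)): s += key[i]*(i+1)'
def solveGoSum (keys : List (List Int)) : Int :=
  keys.foldl
    (fun s key =>
      (PySem.List.pyRange 0 (key.length : Int) 1).foldl
        (fun s i => s + PySem.List.pyGetD key i 0 * (i + 1)) s)
    0

-- the main loop; 'keys[k]' is ported with pyGetD/toNat, exact on the in-range
-- indices the loop produces whenever Pre_solve holds (k = j % K, 0 < K)
def solveLoop (P : Int) (K : Int) : List Int → List (List Int) → Int → Int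
  | [], keys, _ => solveGoSum keys
  | f :: rest, keys, k =>
      let keys' := keys.set k.toNat (PySem.List.pyGetD keys k [] ++ [f])
      if ((PySem.List.pyGetD keys' k []).length : Int) > P + 1 then 0
      else solveLoop P K rest keys' (PySem.Int.mod (k + 1) K)

def solve (P : Int) (K : Int) (L : Int) (frequencies : List Int) : Int :=
  let keys := (PySem.List.pyRange 0 K 1).map (fun _ => ([] : List Int))
  let fs := (PySem.List.sorted frequencies (fun x => x) false).reverse
  solveLoop P K fs keys 0

-- ===== PORT B =====
def solve_alt (P : Int) (K : Int) (L : Int) (frequencies : List Int) : Int :=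
  let fs := PySem.List.sorted frequencies (fun x => x) true
  if fs ≠ [] ∧ (fs.length : Int) > (P + 1) * K then 0
  else (PySem.List.enumerate fs).foldl
        (fun s p => s + p.2 * (PySem.Int.floordiv p.1 K + 1)) 0

-- ===== PRECONDITION & SPEC =====
-- Pre_ excludes the inputs where Python A raises IndexError (a nonempty list with
-- K ≤ 0) and the inputs where A returns the bool False instead of an int (a
-- nonempty list longer than the (P+1)*K slots the keys can hold); B returns False there too.
def Pre_solve (P : Int) (K : Int) (L : Int) (frequencies : List Int) : Prop :=
  frequencies = [] ∨ (0 < K ∧ (frequencies.length : Int) ≤ (P + 1) * K)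
instance (P : Int) (K : Int) (L : Int) (frequencies : List Int) : Decidable (Pre_solve P K L frequencies) := by unfold Pre_solve; infer_instance
def pvWitness_solve : Int × Int × Int × List Int := (1, 2, 0, [3, 1, 2])

def Spec_solve (P : Int) (K : Int) (L : Int) (frequencies : List Int) (out : Int) : Prop := out = solve_alt P K L frequencies
instance (P : Int) (K : Int) (L : Int) (frequencies : List Int) (out : Int) : Decidable (Spec_solve P K L frequencies out) := by unfold Spec_solve; infer_instance

-- ===== CLAIM (what is proved, stated in full; the proofs are below) =====
def Claim_equal_solve : Prop := ∀ (P : Int) (K : Int) (L : Int) (frequencies : List Int), Dom_solve P K L frequencies → Pre_solve P K L frequencies → Spec_solve P K L frequencies (solve P K L frequencies)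

-- ===== LEMMAS AND PROOFS =====

-- reversed(sorted(xs)) = sorted(xs, reverse=True) for plain Ints
lemma rev_sorted_eq (xs : List Int) :
    (PySem.List.sorted xs (fun x => x) false).reverse
      = PySem.List.sorted xs (fun x => x) true := by
  apply PySem.List.eq_of_perm_of_pairwise_le_of_injective (fun x : Int => -x)
    (fun a b h => by simpa using h)
  · exact (((PySem.List.sorted xs _ false).reverse_perm).trans
      (PySem.List.sorted_perm xs _ false)).trans
      (PySem.List.sorted_perm xs _ true).symm
  · rw [List.pairwise_reverse]
    exact (PySem.List.sorted_pairwise xs (fun x => x)).imp (by intro a b h; simp [h])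
  · exact (PySem.List.sorted_pairwise_rev xs (fun x => x)).imp (by intro a b h; simp [h])

-- score of one key as a sum
def scoreKey (key : List Int) : Int :=
  ((PySem.List.pyRange 0 (key.length : Int) 1).map
    (fun i => PySem.List.pyGetD key i 0 * (i + 1))).sum

lemma solveGoSum_aux (keys : List (List Int)) : ∀ s : Int,
    keys.foldl
      (fun s key =>
        (PySem.List.pyRange 0 (key.length : Int) 1).foldl
          (fun s i => s + PySem.List.pyGetD key i 0 * (i + 1)) s)
      s = s + (keys.map scoreKey).sum := by
  induction keys with
  | nil => simp
  | cons k t ih =>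
    intro s
    simp only [List.foldl_cons, List.map_cons, List.sum_cons]
    rw [PySem.List.foldl_add, ih]
    simp [scoreKey]; ring
lemma solveGoSum_eq (keys : List (List Int)) :
    solveGoSum keys = (keys.map scoreKey).sum := by
  unfold solveGoSum; rw [solveGoSum_aux]; ring
lemma scoreKey_append (key : List Int) (x : Int) :
    scoreKey (key ++ [x]) = scoreKey key + x * ((key.length : Int) + 1) := by
  unfold scoreKey
  have hlen : ((key ++ [x]).length : Int) = (key.length : Int) + 1 := by simp
  rw [hlen, PySem.List.pyRange_one_succ_right (by positivity), List.map_append,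
    List.sum_append]
  simp only [List.map_cons, List.map_nil, List.sum_cons, List.sum_nil, add_zero]
  congr 1
  · congr 1
    apply List.map_congr_left
    intro i hi
    rw [PySem.List.mem_pyRange_one] at hi
    congr 1
    rw [PySem.List.pyGetD_of_nonneg, PySem.List.pyGetD_of_nonneg, List.getD_append] <;> omega
  · rw [PySem.List.pyGetD_natCast]
    simp
lemma sum_set_int (l : List Int) (b : Nat) (x : Int) (hb : b < l.length) :
    (l.set b x).sum = l.sum - l[b] + x := by
  induction l generalizing b with
  | nil => simp at hb
  | cons h t ih =>
    cases b with
    | zero => simp [List.set]; ring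
    | succ b =>
      simp only [List.set, List.sum_cons, List.getElem_cons_succ]
      rw [ih b (by simpa using hb)]; ring

def rrBucket (K : Nat) (g : List Int) (j : Nat) (b : Nat) : List Int :=
  ((List.range j).filter (fun i => i % K == b)).map (fun i => g.getD i 0)
def rrKeys (K : Nat) (g : List Int) (j : Nat) : List (List Int) :=
  (List.range K).map (rrBucket K g j)

lemma countRange_mod (K : Nat) (hK : 0 < K) (j b : Nat) (hb : b < K) :
    (List.range j).countP (fun i => i % K == b)
      = j / K + (if b < j % K then 1 else 0) := by
  induction j with
  | zero => simp
  | succ j ih =>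
    rw [List.range_succ, List.countP_append, ih]
    have hdm := Nat.div_add_mod j K
    have hdm' := Nat.div_add_mod (j+1) K
    have hmlt := Nat.mod_lt j hK
    have hmlt' := Nat.mod_lt (j+1) hK
    have hsucc : (j + 1) % K = (j % K + 1) % K := by
      conv_lhs => rw [Nat.add_mod]
      simp
    have hstep : (j % K + 1 = K ∧ (j+1) % K = 0 ∧ (j+1)/K = j/K + 1)
        ∨ (j % K + 1 < K ∧ (j+1) % K = j % K + 1 ∧ (j+1)/K = j/K) := by
      by_cases hc : j % K + 1 = K
      · left
        have h0 : (j+1) % K = 0 := by rw [hsucc, hc]; simp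
        refine ⟨hc, h0, ?_⟩
        rw [Nat.succ_div, if_pos (Nat.dvd_of_mod_eq_zero h0)]
      · right
        have hlt : j % K + 1 < K := by omega
        have h1 : (j+1) % K = j % K + 1 := by rw [hsucc, Nat.mod_eq_of_lt hlt]
        refine ⟨hlt, h1, ?_⟩
        rw [Nat.succ_div, if_neg (fun hd => by
          have := Nat.mod_eq_zero_of_dvd hd
          omega)]
        simp
    simp only [List.countP_cons, List.countP_nil, Nat.zero_add]
    rcases hstep with ⟨h1, h2, h3⟩ | ⟨h1, h2, h3⟩ <;>
      by_cases hjb : j % K = b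
    case pos | pos =>
      simp only [beq_iff_eq, hjb, if_true, h2, h3]
      split_ifs <;> omega
    case neg | neg =>
      simp only [beq_iff_eq, if_neg hjb, h2, h3]
      split_ifs <;> omega
lemma rrBucket_succ (K : Nat) (g : List Int) (j b : Nat) :
    rrBucket K g (j + 1) b
      = rrBucket K g j b ++ (if j % K = b then [g.getD j 0] else []) := by
  unfold rrBucket
  rw [List.range_succ, List.filter_append, List.map_append]
  congr 1
  by_cases h : j % K = b <;> simp [h]

lemma rrBucket_length (K : Nat) (hK : 0 < K) (g : List Int) (j b : Nat) (hb : b < K) :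
    (rrBucket K g j b).length = j / K + (if b < j % K then 1 else 0) := by
  unfold rrBucket
  rw [List.length_map, ← List.countP_eq_length_filter, countRange_mod K hK j b hb]

lemma rrKeys_step (K : Nat) (g : List Int) (j : Nat) :
    rrKeys K g (j + 1)
      = (rrKeys K g j).set (j % K) (rrBucket K g j (j % K) ++ [g.getD j 0]) := by
  apply List.ext_getElem
  · simp [rrKeys]
  · intro b hb hb'
    have hbK : b < K := by simpa [rrKeys] using hb
    rw [List.getElem_set]
    by_cases h : j % K = b
    · simp only [rrKeys, List.getElem_map, List.getElem_range, rrBucket_succ, h]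
      simp
    · rw [if_neg h]
      simp only [rrKeys, List.getElem_map, List.getElem_range]
      rw [rrBucket_succ, if_neg h]
      simp
def wSum (K : Nat) (g : List Int) (j : Nat) : Int :=
  ∑ i ∈ Finset.range j, g.getD i 0 * ((i / K : Nat) + 1)

lemma score_rrKeys_step (K : Nat) (hK : 0 < K) (g : List Int) (j : Nat) :
    ((rrKeys K g (j + 1)).map scoreKey).sum
      = ((rrKeys K g j).map scoreKey).sum + g.getD j 0 * (((j / K : Nat) : Int) + 1) := by
  rw [rrKeys_step K g j, List.map_set]
  have hb : j % K < (rrKeys K g j).length := by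
    simp [rrKeys]; exact Nat.mod_lt j hK
  rw [sum_set_int _ _ _ (by simpa using hb)]
  have hget : ((rrKeys K g j).map scoreKey)[j % K]'(by simpa using hb)
      = scoreKey (rrBucket K g j (j % K)) := by
    simp [rrKeys]
  rw [hget, scoreKey_append]
  have hlen : ((rrBucket K g j (j % K)).length : Int) = ((j / K : Nat) : Int) := by
    rw [rrBucket_length K hK g j (j % K) (Nat.mod_lt j hK)]
    simp
  rw [hlen]; ring

lemma score_rrKeys (K : Nat) (hK : 0 < K) (g : List Int) (j : Nat) :
    ((rrKeys K g j).map scoreKey).sum = wSum K g j := by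
  induction j with
  | zero =>
    simp [wSum]
    apply List.sum_eq_zero
    intro x hx
    simp only [List.mem_map] at hx
    obtain ⟨key, hk, rfl⟩ := hx
    obtain ⟨b, hb, rfl⟩ := by simpa [rrKeys] using hk
    simp [rrBucket, scoreKey]
  | succ j ih =>
    rw [score_rrKeys_step K hK g j, ih]
    have : wSum K g (j + 1) = wSum K g j + g.getD j 0 * (((j / K : Nat) : Int) + 1) := by
      rw [wSum, Finset.sum_range_succ]; rfl
    rw [this]
lemma alt_fold_eq (K : Nat) :
    ∀ (l : List Int) (a : Nat) (s : Int),
      (PySem.List.enumerate l (a : Int)).foldl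
          (fun s p => s + p.2 * (PySem.Int.floordiv p.1 (K : Int) + 1)) s
        = s + ∑ i ∈ Finset.range l.length, l.getD i 0 * ((((a + i) / K : Nat) : Int) + 1) := by
  intro l
  induction l with
  | nil => intro a s; simp [PySem.List.enumerate]
  | cons x t ih =>
    intro a s
    rw [PySem.List.enumerate_cons, List.foldl_cons]
    have hcast : ((a : Int) + 1) = ((a + 1 : Nat) : Int) := by push_cast; ring
    rw [hcast, ih (a + 1)]
    have hfd : PySem.Int.floordiv (a : Int) (K : Int) = ((a / K : Nat) : Int) := by
      exact_mod_cast PySem.Int.floordiv_natCast a K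
    rw [hfd]
    rw [List.length_cons, Finset.sum_range_succ']
    simp only [List.getD_cons_succ, List.getD_cons_zero, Nat.add_zero]
    have harg : ∀ i : Nat, a + 1 + i = a + (i + 1) := by omega
    simp only [harg]
    ring
lemma overflow_iff (P : Int) (K : Nat) (hK : 0 < K) (n : Nat) (hn : 0 < n) :
    ((((n - 1) / K : Nat) : Int) + 1 > P + 1) ↔ ((n : Int) > (P + 1) * K) := by
  by_cases hP : P + 1 ≤ 0
  · constructor
    · intro _
      calc (P + 1) * K ≤ 0 := mul_nonpos_iff.mpr (Or.inr ⟨hP, by positivity⟩)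
        _ < n := by exact_mod_cast hn
    · intro _
      have : (0 : Int) ≤ ((n - 1) / K : Nat) := by positivity
      omega
  · have hcast : ((P + 1).toNat : Int) = P + 1 := Int.toNat_of_nonneg (by omega)
    have hq : (P + 1).toNat ≤ (n - 1) / K ↔ (P + 1).toNat * K ≤ n - 1 :=
      Nat.le_div_iff_mul_le hK
    rw [← hcast]
    constructor
    · intro h
      have h' : (P + 1).toNat ≤ (n - 1) / K := by exact_mod_cast by omega
      have h2 := hq.mp h'
      have h3 : (P + 1).toNat * K < n := by omega
      calc ((P + 1).toNat : Int) * K = (((P + 1).toNat * K : Nat) : Int) := by push_cast; ring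
        _ < n := by exact_mod_cast h3
    · intro h
      have h3 : (((P + 1).toNat * K : Nat) : Int) < n := by push_cast; omega
      have h2 : (P + 1).toNat * K ≤ n - 1 := by
        have : ((P + 1).toNat * K : Nat) < n := by exact_mod_cast h3
        omega
      have h' := hq.mpr h2
      have : (((P + 1).toNat : Nat) : Int) ≤ (((n - 1) / K : Nat) : Int) := by exact_mod_cast h'
      omega

lemma solveLoop_eq (P : Int) (K : Nat) (hK : 0 < K) (g : List Int) :
    ∀ (m j : Nat), m = g.length - j → j ≤ g.length →
    solveLoop P (K : Int) (g.drop j) (rrKeys K g j) ((j % K : Nat) : Int)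
      = if j < g.length ∧ (((g.length - 1) / K : Nat) : Int) + 1 > P + 1 then 0
        else wSum K g g.length := by
  intro m
  induction m with
  | zero =>
    intro j hm hj
    have hjl : j = g.length := by omega
    subst hjl
    rw [List.drop_length, if_neg (by omega)]
    rw [solveLoop, solveGoSum_eq, score_rrKeys K hK]
  | succ m ih =>
    intro j hm hj
    have hjl : j < g.length := by omega
    rw [List.drop_eq_getElem_cons hjl, solveLoop]
    have hbK : j % K < K := Nat.mod_lt j hK
    have htn : ((j % K : Nat) : Int).toNat = j % K := Int.toNat_natCast _
    have hget : PySem.List.pyGetD (rrKeys K g j) ((j % K : Nat) : Int) []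
        = rrBucket K g j (j % K) := by
      rw [PySem.List.pyGetD_natCast]
      simp [rrKeys, List.getD_eq_getElem?_getD, hbK]
    have hset : (rrKeys K g j).set ((j % K : Nat) : Int).toNat
          (PySem.List.pyGetD (rrKeys K g j) ((j % K : Nat) : Int) [] ++ [g[j]])
        = rrKeys K g (j + 1) := by
      rw [htn, hget, rrKeys_step K g j, List.getD_eq_getElem g 0 hjl]
    simp only [hset]
    have hget' : PySem.List.pyGetD (rrKeys K g (j + 1)) ((j % K : Nat) : Int) []
        = rrBucket K g (j + 1) (j % K) := by
      rw [PySem.List.pyGetD_natCast]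
      simp [rrKeys, List.getD_eq_getElem?_getD, hbK]
    rw [hget']
    have hlen : ((rrBucket K g (j + 1) (j % K)).length : Int) = ((j / K : Nat) : Int) + 1 := by
      rw [rrBucket_succ, if_pos rfl, List.length_append,
        rrBucket_length K hK g j (j % K) hbK, if_neg (lt_irrefl _)]
      simp
    rw [hlen]
    by_cases hover : ((j / K : Nat) : Int) + 1 > P + 1
    · rw [if_pos hover, if_pos]
      refine ⟨hjl, ?_⟩
      have hmono : j / K ≤ (g.length - 1) / K := Nat.div_le_div_right (by omega)
      have : ((j / K : Nat) : Int) ≤ (((g.length - 1) / K : Nat) : Int) := by exact_mod_cast hmono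
      omega
    · rw [if_neg hover]
      have hmod : PySem.Int.mod (((j % K : Nat) : Int) + 1) (K : Int)
          = (((j + 1) % K : Nat) : Int) := by
        rw [PySem.Int.mod_eq_emod_of_pos (by exact_mod_cast hK)]
        have h1 : (((j % K : Nat) : Int) + 1) = (((j % K + 1 : Nat)) : Int) := by push_cast; ring
        rw [h1]
        have h2 : (j % K + 1) % K = (j + 1) % K := by
          simp [Nat.add_mod]
        rw [← Int.natCast_mod, h2]
      rw [hmod, ih (j + 1) (by omega) (by omega)]
      by_cases hc : (((g.length - 1) / K : Nat) : Int) + 1 > P + 1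
      · by_cases hj1 : j + 1 < g.length
        · rw [if_pos ⟨hj1, hc⟩, if_pos ⟨hjl, hc⟩]
        · exfalso
          have hje : j = g.length - 1 := by omega
          rw [← hje] at hc
          exact hover hc
      · rw [if_neg (by tauto), if_neg (by tauto)]

-- ===== VERDICT (by name: the statement is the Claim_ definition above) =====
theorem solve_spec : Claim_equal_solve := by
  intro P K L fs _ hpre
  unfold Spec_solve solve solve_alt
  dsimp only
  rcases hpre with hfs | ⟨hK, hbound⟩
  · subst hfs
    have hsn : ∀ r, PySem.List.sorted ([] : List Int) (fun x => x) r = [] := by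
      intro r; exact (PySem.List.sorted_eq_nil_iff _ _ _).mpr rfl
    rw [hsn, hsn, List.reverse_nil, solveLoop, solveGoSum_eq]
    simp [Function.comp_def, scoreKey, PySem.List.enumerate, PySem.List.pyRange_one]
  · have hKc : ((K.toNat : Nat) : Int) = K := Int.toNat_of_nonneg (by omega)
    have hKn : 0 < K.toNat := by omega
    set g := PySem.List.sorted fs (fun x => x) true with hg
    rw [rev_sorted_eq]
    have hinit : ((PySem.List.pyRange 0 K 1).map (fun _ => ([] : List Int)))
        = rrKeys K.toNat g 0 := by
      rw [PySem.List.pyRange_one]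
      unfold rrKeys rrBucket
      simp [Function.comp_def, List.map_const']
    rw [hinit]
    have hloop := solveLoop_eq P K.toNat hKn g g.length 0 (by omega) (by omega)
    rw [List.drop_zero, hKc] at hloop
    simp only [Nat.zero_mod, Nat.cast_zero] at hloop
    rw [hloop]
    by_cases hne : g = []
    · rw [hne]
      simp only [List.length_nil]
      rw [if_neg (by omega)]
      simp [wSum, PySem.List.enumerate]
    · have hlen0 : 0 < g.length := List.length_pos_iff.mpr hne
      have hiff := overflow_iff P K.toNat hKn g.length hlen0
      rw [hKc] at hiff
      have hglen : g.length = fs.length := PySem.List.length_sorted _ _ _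
      have hov : ¬((g.length : Int) > (P + 1) * K) := by rw [hglen]; omega
      rw [if_neg (by
          intro hcon
          exact hov (hiff.mp hcon.2)), if_neg (by
          intro hcon
          exact hov hcon.2)]
      have halt := alt_fold_eq K.toNat g 0 0
      simp only [Nat.cast_zero, zero_add] at halt
      rw [hKc] at halt
      rw [halt, wSum]
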